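-- pv_equiv track=rewrite | github.com/qvizt/HackerRank-Solutions-Java | Python/Algorithms/Implementation/Picking Numbers.py | longest_selection
-- ===== SOURCE A (Python) =====
-- def longest_selection(numbers):
--     numbers.sort()
--
--     selection_start_number = numbers[0]
--     next_greater_number_index = 1
--     current_selection_length = 1
--     longest_selection_length = 1
--
--     for i in range(1, len(numbers)):
--         current_number = numbers[i]
--         difference = current_number - selection_start_number
--
--         if difference <= 1:
--             current_selection_length += 1
--             longest_selection_length = max(longest_selection_length, current_selection_length)
--             if difference == 1 and current_number != numbers[next_greater_number_index]:
--                 next_greater_number_index = i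
--         else:
--             selection_start_number = current_number
--             next_greater_number_index = i + 1
--             current_selection_length = 1
--
--     return longest_selection_length
-- ===== SOURCE B (Python) =====
-- def longest_selection(numbers):
--     # Same in-place sort side effect as A; raises IndexError on [] like A.
--     numbers.sort()
--     start = numbers[0]
--     runs = []  # run-length encoding of the sorted list: [(value, count)]
--     for v in numbers:
--         if runs and runs[-1][0] == v:
--             runs[-1] = (v, runs[-1][1] + 1)
--         else:
--             runs.append((v, 1))
--     best = 1
--     length = 0
--     for v, c in runs:
--         if v - start <= 1:
--             length += c
--         else:
--             start = v
--             length = c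
--         best = max(best, length)
--     return best
-- ===== Notes on version B (the rewrite author's own statement) =====
-- stated objective: alternative
-- what changed: B replaces A's per-element index loop with its dead next_greater_number_index bookkeeping by a one-pass run-length encoding of the sorted list followed by the same greedy grouping computed over (value,count) runs.
import Mathlib
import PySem

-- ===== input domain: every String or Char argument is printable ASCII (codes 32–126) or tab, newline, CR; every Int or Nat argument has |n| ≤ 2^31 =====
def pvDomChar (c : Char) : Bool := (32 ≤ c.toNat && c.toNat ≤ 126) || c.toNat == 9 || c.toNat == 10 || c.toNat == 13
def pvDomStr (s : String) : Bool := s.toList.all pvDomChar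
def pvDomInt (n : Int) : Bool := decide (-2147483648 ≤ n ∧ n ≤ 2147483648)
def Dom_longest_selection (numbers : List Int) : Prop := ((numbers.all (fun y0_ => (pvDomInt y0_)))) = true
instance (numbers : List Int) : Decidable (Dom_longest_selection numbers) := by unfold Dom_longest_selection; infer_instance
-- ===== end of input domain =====

-- B replaces A's per-element index loop (with its dead next_greater_number_index bookkeeping)
-- by a run-length encoding of the sorted list followed by the same greedy grouping over
-- (value, count) runs; objective: alternative. Both A and B sort the list in place; the
-- equivalence proved here is about the return value (the mutation is identical anyway).

-- ===== PORT A =====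
-- Loop body of A; state = (selection_start_number, next_greater_number_index,
-- current_selection_length, longest_selection_length).
-- numbers[ngi] is always in range whenever Python evaluates it (ngi is set to i or i+1 and only
-- read at a strictly later iteration, or is the initial 1 with at least two elements), so
-- pyGetD with default 0 is exact; moreover ngi never influences the returned value.
def pvAStep (s : List Int) (st : Int × Int × Int × Int) (i : Int) : Int × Int × Int × Int :=
  match st with
  | (start, ngi, cur, best) =>
    let current := PySem.List.pyGetD s i 0
    let diff := current - start
    if diff ≤ 1 then
      let cur' := cur + 1
      let best' := max best cur'
      if diff = 1 ∧ current ≠ PySem.List.pyGetD s ngi 0 then (start, i, cur', best')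
      else (start, ngi, cur', best')
    else (current, i + 1, 1, best)

def longest_selection (numbers : List Int) : Int :=
  let s := PySem.List.sorted numbers (fun x => x) false
  match s with
  | [] => 0   -- numbers[0]: IndexError in Python; excluded by Pre_
  | h :: _ =>
    (((PySem.List.pyRange 1 (s.length : Int)).foldl (pvAStep s) (h, 1, 1, 1))).2.2.2

-- ===== PORT B =====
-- one step of B's run-building loop: merge v into the last run or start a new one
def pvPushRun (runs : List (Int × Int)) (v : Int) : List (Int × Int) :=
  match runs.getLast? with
  | some (w, c) => if w = v then runs.dropLast ++ [(v, c + 1)] else runs ++ [(v, 1)]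
  | none => [(v, 1)]

-- one step of B's greedy loop over runs; state = (start, length, best)
def pvGStep (st : Int × Int × Int) (p : Int × Int) : Int × Int × Int :=
  match st, p with
  | (start, len, best), (v, c) =>
    if v - start ≤ 1 then (start, len + c, max best (len + c))
    else (v, c, max best c)

def longest_selection_alt (numbers : List Int) : Int :=
  let s := PySem.List.sorted numbers (fun x => x) false
  match s with
  | [] => 0   -- numbers[0]: IndexError in Python; excluded by Pre_
  | h :: _ =>
    let runs := s.foldl pvPushRun []
    (runs.foldl pvGStep (h, 0, 1)).2.2

-- ===== PRECONDITION & SPEC =====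
-- Pre_ excludes exactly the empty list, on which Python A (and B) raise IndexError at numbers[0].
def Pre_longest_selection (numbers : List Int) : Prop := numbers ≠ []
instance (numbers : List Int) : Decidable (Pre_longest_selection numbers) := by unfold Pre_longest_selection; infer_instance
def pvWitness_longest_selection : List Int := [4, 6, 5, 3, 3, 1]

def Spec_longest_selection (numbers : List Int) (out : Int) : Prop := out = longest_selection_alt numbers
instance (numbers : List Int) (out : Int) : Decidable (Spec_longest_selection numbers out) := by unfold Spec_longest_selection; infer_instance

-- ===== CLAIM (what is proved, stated in full; the proofs are below) =====
def Claim_equal_longest_selection : Prop := ∀ (numbers : List Int), Dom_longest_selection numbers → Pre_longest_selection numbers → Spec_longest_selection numbers (longest_selection numbers)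

-- ===== LEMMAS AND PROOFS =====

-- A's loop body with the dead next_greater_number_index component projected away;
-- state = (start, cur, best), input = the current element value.
def pvEStep (st : Int × Int × Int) (v : Int) : Int × Int × Int :=
  match st with
  | (start, cur, best) =>
    if v - start ≤ 1 then (start, cur + 1, max best (cur + 1)) else (v, 1, best)

def pvProj (st : Int × Int × Int × Int) : Int × Int × Int := (st.1, st.2.2.1, st.2.2.2)

theorem pvProj_AStep (s : List Int) (st : Int × Int × Int × Int) (i : Int) :
    pvProj (pvAStep s st i) = pvEStep (pvProj st) (PySem.List.pyGetD s i 0) := by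
  obtain ⟨a, b, c, d⟩ := st
  simp only [pvAStep, pvEStep, pvProj]
  split_ifs <;> rfl

theorem pvProj_foldA (s : List Int) (l : List Int) (st : Int × Int × Int × Int) :
    pvProj (l.foldl (pvAStep s) st)
      = l.foldl (fun acc j => pvEStep acc (PySem.List.pyGetD s j 0)) (pvProj st) := by
  induction l generalizing st with
  | nil => rfl
  | cons i l ih => simp only [List.foldl_cons, ih, pvProj_AStep]

-- pending-run characterisation of B's run-building loop
def pvRleAcc (w c : Int) : List Int → List (Int × Int)
  | [] => [(w, c)]
  | v :: t => if v = w then pvRleAcc w (c + 1) t else (w, c) :: pvRleAcc v 1 t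

theorem pvPushRun_concat (r : List (Int × Int)) (w c v : Int) :
    pvPushRun (r ++ [(w, c)]) v
      = if w = v then r ++ [(w, c + 1)] else (r ++ [(w, c)]) ++ [(v, 1)] := by
  simp only [pvPushRun, List.getLast?_concat, List.dropLast_concat]
  split_ifs with h
  · subst h; rfl
  · rfl

theorem pvFold_pushRun (t : List Int) : ∀ (r : List (Int × Int)) (w c : Int),
    t.foldl pvPushRun (r ++ [(w, c)]) = r ++ pvRleAcc w c t := by
  induction t with
  | nil => intro r w c; rfl
  | cons v t ih =>
    intro r w c
    simp only [List.foldl_cons, pvPushRun_concat, pvRleAcc]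
    by_cases h : v = w
    · simp [h, ih]
    · have h' : ¬ w = v := fun hh => h hh.symm
      simp only [if_neg h', if_neg h]
      rw [ih (r ++ [(w, c)]) v 1, List.append_assoc]
      rfl

theorem pvRuns_eq (h : Int) (t : List Int) :
    (h :: t).foldl pvPushRun [] = pvRleAcc h 1 t := by
  have : (h :: t).foldl pvPushRun [] = t.foldl pvPushRun ([] ++ [(h, 1)]) := rfl
  rw [this, pvFold_pushRun]; rfl

-- the two step functions simulate each other
theorem pvE_after_G (S : Int × Int × Int) (w c : Int) :
    pvEStep (pvGStep S (w, c)) w = pvGStep S (w, c + 1) := by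
  obtain ⟨a, l, b⟩ := S
  simp only [pvGStep, pvEStep]
  split_ifs <;> try (exfalso; omega)
  · have : max (max b (l + c)) (l + c + 1) = max b (l + c + 1) := by omega
    rw [this]; ring_nf
  · have : max (max b c) (c + 1) = max b (c + 1) := by omega
    rw [this]

theorem pvE_eq_G_one (S : Int × Int × Int) (v : Int) (hb : 1 ≤ S.2.2) :
    pvEStep S v = pvGStep S (v, 1) := by
  obtain ⟨a, l, b⟩ := S
  simp only [pvEStep, pvGStep]
  split_ifs with h
  · rfl
  · simp at hb
    have : max b 1 = b := by omega
    rw [this]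

theorem pvGStep_best_ge (S : Int × Int × Int) (p : Int × Int) (hb : 1 ≤ S.2.2) :
    1 ≤ (pvGStep S p).2.2 := by
  obtain ⟨a, l, b⟩ := S; obtain ⟨v, c⟩ := p
  simp only [pvGStep]
  simp at hb
  split_ifs <;> simp <;> omega

theorem pvSim (t : List Int) : ∀ (w c : Int) (S : Int × Int × Int), 1 ≤ S.2.2 →
    ((pvRleAcc w c t).foldl pvGStep S).2.2
      = (t.foldl pvEStep (pvGStep S (w, c))).2.2 := by
  induction t with
  | nil => intro w c S _; rfl
  | cons v t ih =>
    intro w c S hb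
    simp only [pvRleAcc]
    by_cases h : v = w
    · subst h
      rw [if_pos rfl, ih v (c + 1) S hb, List.foldl_cons, pvE_after_G]
    · rw [if_neg h, List.foldl_cons, ih v 1 (pvGStep S (w, c)) (pvGStep_best_ge S (w, c) hb),
        List.foldl_cons, pvE_eq_G_one (pvGStep S (w, c)) v (pvGStep_best_ge S (w, c) hb)]

-- ===== VERDICT (by name: the statement is the Claim_ definition above) =====
theorem longest_selection_spec : Claim_equal_longest_selection := by
  intro numbers _ _
  unfold Spec_longest_selection longest_selection longest_selection_alt
  cases hs : PySem.List.sorted numbers (fun x => x) false with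
  | nil => rfl
  | cons h t =>
    simp only []
    -- A side
    have hA : pvProj ((PySem.List.pyRange 1 ((h :: t).length : Int)).foldl
        (pvAStep (h :: t)) (h, 1, 1, 1))
        = t.foldl pvEStep (h, 1, 1) := by
      rw [pvProj_foldA]
      have := PySem.List.foldl_pyRange_pyGetD' (h :: t) 0 pvEStep
        (pvProj (h, 1, 1, 1)) (a := 1) (by norm_num)
      simpa using this
    have hA' : (((PySem.List.pyRange 1 ((h :: t).length : Int)).foldl
        (pvAStep (h :: t)) (h, 1, 1, 1))).2.2.2 = (t.foldl pvEStep (h, 1, 1)).2.2 := by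
      have := congrArg (fun st => st.2.2) hA
      simpa [pvProj] using this
    rw [hA']
    -- B side
    rw [pvRuns_eq, pvSim t h 1 (h, 0, 1) (by norm_num)]
    have : pvGStep (h, 0, 1) (h, 1) = (h, 1, 1) := by
      simp [pvGStep]
    rw [this]
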